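-- pv_equiv track=rewrite | github.com/Eyal231/my-project | python/alice copy.py | fix_story_to_lower
-- ===== SOURCE A (Python) =====
-- def fix_story_to_lower(the_original_story):
--     x = []
--     new_clean_story = the_original_story.lower()
--     for word_to_check in (list(new_clean_story.split(' '))):
--          if word_to_check.isalpha() == True:
--              x.append(word_to_check)
--          else:
--             for sec_check in word_to_check:
--                 #for letter in sec_check:
--                     if sec_check.isalpha() == False:
--                        x.append(' ')
--                     else:
--                          x.append(sec_check)
--     return(x)
-- ===== SOURCE B (Python) =====
-- def _flush(buf, result):
--     if buf.isalpha():
--         result.append(buf)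
--     else:
--         for ch in buf:
--             result.append(ch if ch.isalpha() else ' ')
--
-- def fix_story_to_lower(the_original_story):
--     result = []
--     buf = ""
--     for ch in the_original_story.lower():
--         if ch == ' ':
--             _flush(buf, result)
--             buf = ""
--         else:
--             buf += ch
--     _flush(buf, result)
--     return result
-- ===== Notes on version B (the rewrite author's own statement) =====
-- stated objective: alternative
-- what changed: Replaced the split-into-tokens-then-classify passes by a single character-by-character scan that maintains a current-token buffer and flushes it at each space delimiter and at end of string.
import Mathlib
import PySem

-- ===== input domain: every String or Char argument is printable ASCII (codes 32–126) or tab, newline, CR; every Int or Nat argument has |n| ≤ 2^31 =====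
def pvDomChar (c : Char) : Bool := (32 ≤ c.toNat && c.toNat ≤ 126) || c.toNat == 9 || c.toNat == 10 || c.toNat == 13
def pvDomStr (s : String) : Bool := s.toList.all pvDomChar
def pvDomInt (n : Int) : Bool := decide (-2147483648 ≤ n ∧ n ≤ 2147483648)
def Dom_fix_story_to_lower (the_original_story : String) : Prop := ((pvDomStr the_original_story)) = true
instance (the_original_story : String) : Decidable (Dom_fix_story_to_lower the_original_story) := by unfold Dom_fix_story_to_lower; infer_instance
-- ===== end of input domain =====

-- B replaces A's split-then-classify with a one-pass buffer/flush scan over the lowered string (alternative decomposition, same cost).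

-- ===== PORT A =====
-- `clean.split(' ')` with the nonempty separator " " never raises; it is
-- PySem.Chars.splitOn on the code points, mapped back to strings (= the some-branch of PySem.Str.split?).
def fix_story_to_lower (the_original_story : String) : List String :=
  let new_clean_story := PySem.Str.lower the_original_story
  ((PySem.Chars.splitOn new_clean_story.toList [' ']).map String.ofList).foldl
    (fun x word_to_check =>
      if PySem.Str.strIsalpha word_to_check then
        x ++ [word_to_check]
      else
        word_to_check.toList.foldl
          (fun x sec_check =>
            if PySem.Chars.isalpha sec_check = false then x ++ [" "]
            else x ++ [String.ofList [sec_check]]) x) []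

-- ===== PORT B =====
-- flush the current-token buffer: a fully-alphabetic buffer is appended whole,
-- otherwise each char is appended (alpha as itself, non-alpha as " ").
def pvFlush (buf : List Char) (result : List String) : List String :=
  if PySem.Chars.strIsalpha buf then result ++ [String.ofList buf]
  else result ++ buf.map (fun ch => if PySem.Chars.isalpha ch then String.ofList [ch] else " ")

def pvLoop : List Char → List Char → List String → List String
  | [], buf, result => pvFlush buf result
  | ch :: rest, buf, result =>
      if ch = ' ' then pvLoop rest [] (pvFlush buf result)
      else pvLoop rest (buf ++ [ch]) result

def fix_story_to_lower_alt (the_original_story : String) : List String :=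
  pvLoop (PySem.Str.lower the_original_story).toList [] []

-- ===== PRECONDITION & SPEC =====
def Spec_fix_story_to_lower (the_original_story : String) (out : List String) : Prop := out = fix_story_to_lower_alt the_original_story
instance (the_original_story : String) (out : List String) : Decidable (Spec_fix_story_to_lower the_original_story out) := by unfold Spec_fix_story_to_lower; infer_instance

-- ===== CLAIM (what is proved, stated in full; the proofs are below) =====
def Claim_equal_fix_story_to_lower : Prop := ∀ (the_original_story : String), Dom_fix_story_to_lower the_original_story → Spec_fix_story_to_lower the_original_story (fix_story_to_lower the_original_story)

-- ===== LEMMAS AND PROOFS =====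

-- what A emits for one token
def pvEmit (w : List Char) : List String :=
  if PySem.Chars.strIsalpha w then [String.ofList w]
  else w.map (fun ch => if PySem.Chars.isalpha ch then String.ofList [ch] else " ")

lemma pvFlush_eq_emit (buf : List Char) (result : List String) :
    pvFlush buf result = result ++ pvEmit buf := by
  unfold pvFlush pvEmit; split_ifs <;> simp

-- splitOn.go, fuel-independent accumulator lemma
lemma go_acc (fuel : Nat) : ∀ (l cur : List Char) (acc : List (List Char)),
    PySem.Chars.splitOn.go [' '] fuel l cur acc =
      acc.reverse ++ PySem.Chars.splitOn.go [' '] fuel l cur [] := by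
  induction fuel with
  | zero => intro l cur acc; simp [PySem.Chars.splitOn.go]
  | succ n ih =>
      intro l cur acc
      cases l with
      | nil => simp [PySem.Chars.splitOn.go]
      | cons c rest =>
          simp only [PySem.Chars.splitOn.go]
          split
          · rw [ih (List.drop [' '].length (c :: rest)) [] (cur.reverse :: acc),
                ih (List.drop [' '].length (c :: rest)) [] [cur.reverse]]
            simp
          · rw [ih rest (c :: cur) acc, ih rest (c :: cur) []]

lemma go_nil (fuel : Nat) (cur : List Char) (acc : List (List Char)) :
    PySem.Chars.splitOn.go [' '] fuel [] cur acc = (cur.reverse :: acc).reverse := by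
  cases fuel <;> simp [PySem.Chars.splitOn.go]

lemma go_nospace : ∀ (buf : List Char), ' ' ∉ buf → ∀ (fuel : Nat) (l cur : List Char) (acc : List (List Char)),
    buf.length < fuel →
    PySem.Chars.splitOn.go [' '] fuel (buf ++ l) cur acc =
      PySem.Chars.splitOn.go [' '] (fuel - buf.length) l (buf.reverse ++ cur) acc := by
  intro buf
  induction buf with
  | nil => intro _ fuel l cur acc _; simp
  | cons c cs ih =>
      intro hmem fuel l cur acc hf
      obtain ⟨n, rfl⟩ : ∃ n, fuel = n + 1 := ⟨fuel - 1, by omega⟩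
      have hc : c ≠ ' ' := fun h => hmem (h ▸ List.mem_cons_self)
      have hpre : List.isPrefixOf [' '] (c :: (cs ++ l)) = false := by
        simp [List.isPrefixOf]; exact fun h => hc h.symm
      simp only [List.cons_append, PySem.Chars.splitOn.go, hpre]
      rw [ih (fun h => hmem (List.mem_cons_of_mem _ h)) n l (c :: cur) acc (by simpa using hf)]
      simp only [List.length_cons, List.reverse_cons, List.append_assoc, List.cons_append,
        List.nil_append]
      rw [if_neg (by simp)]
      congr 1
      omega

lemma splitOn_nospace (buf : List Char) (h : ' ' ∉ buf) :
    PySem.Chars.splitOn buf [' '] = [buf] := by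
  unfold PySem.Chars.splitOn
  have h2 := go_nospace buf h (buf.length + 1) [] [] [] (by omega)
  simp only [List.append_nil] at h2
  rw [h2, go_nil]
  simp

lemma splitOn_space_split (buf rest : List Char) (h : ' ' ∉ buf) :
    PySem.Chars.splitOn (buf ++ ' ' :: rest) [' '] = buf :: PySem.Chars.splitOn rest [' '] := by
  unfold PySem.Chars.splitOn
  rw [go_nospace buf h ((buf ++ ' ' :: rest).length + 1) (' ' :: rest) [] [] (by simp)]
  have hlen : (buf ++ ' ' :: rest).length + 1 - buf.length = rest.length + 1 + 1 := by
    simp; omega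
  rw [hlen]
  have hpre : List.isPrefixOf [' '] (' ' :: rest) = true := by simp [List.isPrefixOf]
  simp only [PySem.Chars.splitOn.go, hpre]
  rw [go_acc]
  simp

-- the main loop invariant: pvLoop consumes cs, with a space-free buffer, and produces
-- exactly A's per-token emissions of split(buf ++ cs)
lemma pvLoop_eq : ∀ (cs buf : List Char) (acc : List String), ' ' ∉ buf →
    pvLoop cs buf acc = acc ++ (PySem.Chars.splitOn (buf ++ cs) [' ']).flatMap pvEmit := by
  intro cs
  induction cs with
  | nil =>
      intro buf acc h
      simp [pvLoop, pvFlush_eq_emit, splitOn_nospace buf h]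
  | cons c rest ih =>
      intro buf acc h
      by_cases hc : c = ' '
      · subst hc
        simp only [pvLoop, if_pos]
        rw [ih [] (pvFlush buf acc) (List.not_mem_nil), pvFlush_eq_emit,
            splitOn_space_split buf rest h]
        simp
      · simp only [pvLoop, if_neg hc]
        have hmem : ' ' ∉ buf ++ [c] := by
          intro hm
          rcases List.mem_append.mp hm with h1 | h2
          · exact h h1
          · exact hc (List.mem_singleton.mp h2).symm
        rw [ih (buf ++ [c]) acc hmem]
        simp

-- A's inner per-character loop appends the per-char mapping
lemma inner_foldl (w : List Char) (x : List String) :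
    w.foldl (fun x sec_check =>
        if PySem.Chars.isalpha sec_check = false then x ++ [" "]
        else x ++ [String.ofList [sec_check]]) x
      = x ++ w.map (fun ch => if PySem.Chars.isalpha ch then String.ofList [ch] else " ") := by
  induction w generalizing x with
  | nil => simp
  | cons c cs ih =>
      simp only [List.foldl_cons, List.map_cons, ih]
      by_cases hc : PySem.Chars.isalpha c <;> simp [hc]

lemma A_eq_flatMap (tokens : List (List Char)) :
    (tokens.map String.ofList).foldl
      (fun x word_to_check =>
        if PySem.Str.strIsalpha word_to_check then
          x ++ [word_to_check]
        else
          word_to_check.toList.foldl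
            (fun x sec_check =>
              if PySem.Chars.isalpha sec_check = false then x ++ [" "]
              else x ++ [String.ofList [sec_check]]) x) []
      = tokens.flatMap pvEmit := by
  have key : ∀ (ts : List (List Char)) (x : List String),
      (ts.map String.ofList).foldl
        (fun x word_to_check =>
          if PySem.Str.strIsalpha word_to_check then
            x ++ [word_to_check]
          else
            word_to_check.toList.foldl
              (fun x sec_check =>
                if PySem.Chars.isalpha sec_check = false then x ++ [" "]
                else x ++ [String.ofList [sec_check]]) x) x
        = x ++ ts.flatMap pvEmit := by
    intro ts
    induction ts with
    | nil => intro x; simp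
    | cons w ws ih =>
        intro x
        simp only [List.map_cons, List.foldl_cons]
        have hb : PySem.Str.strIsalpha (String.ofList w) = PySem.Chars.strIsalpha w := by
          simp [PySem.Str.strIsalpha]
        rw [hb]
        by_cases hw : PySem.Chars.strIsalpha w = true
        · rw [if_pos hw, ih]
          simp [pvEmit, hw]
        · rw [if_neg hw]
          have ht : (String.ofList w).toList = w := by simp
          rw [ht, inner_foldl, ih]
          simp [pvEmit, hw]
  simpa using key tokens []

-- ===== VERDICT (by name: the statement is the Claim_ definition above) =====
theorem fix_story_to_lower_spec : Claim_equal_fix_story_to_lower := by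
  intro s _
  unfold Spec_fix_story_to_lower fix_story_to_lower fix_story_to_lower_alt
  rw [A_eq_flatMap, pvLoop_eq _ [] [] (by simp)]
  simp
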